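-- pv_equiv track=rewrite | github.com/blakej2432/Algorithm-study | 프로그래머스/스택,큐/다리를 지나는 트럭.py | solution
-- ===== SOURCE A (Python) =====
-- def solution(bridge_length, weight, truck_weights):
--     answer = 0
--     trucks_on_bridge = [0] * bridge_length
--     while len(trucks_on_bridge):
--         answer += 1
--         trucks_on_bridge.pop(0)
--         if truck_weights:
--             if sum(trucks_on_bridge) + truck_weights[0] <= weight:
--                 trucks_on_bridge.append(truck_weights.pop(0))
--             else:
--                 trucks_on_bridge.append(0)
--     return answer
-- ===== SOURCE B (Python) =====
-- def solution(bridge_length, weight, truck_weights):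
--     # Tick simulation keeping only the trucks actually on the bridge as
--     # (weight, leave_time) entries plus a running load, instead of A's
--     # zero-padded list that is re-summed every tick.  Once every truck has
--     # entered, the remaining drain phase is just bridge_length extra ticks,
--     # so we return t + bridge_length directly.
--     # Like A, this empties truck_weights in place (return-value equivalence).
--     if bridge_length <= 0:
--         return 0  # degenerate bridge: no truck ever occupies it, no time passes
--     on = []          # (weight, leave_time) of trucks on the bridge, entry order
--     load = 0         # sum of weights currently on the bridge
--     t = 0            # current tick
--     while truck_weights:
--         t += 1
--         # leave times are strictly increasing, so at most one truck departs per tick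
--         if on and on[0][1] <= t:
--             load -= on.pop(0)[0]
--         w = truck_weights[0]
--         if load + w <= weight:
--             truck_weights.pop(0)
--             on.append((w, t + bridge_length))
--             load += w
--     return t + bridge_length
-- ===== Notes on version B (the rewrite author's own statement) =====
-- stated objective: alternative
-- what changed: B keeps only the trucks actually on the bridge as (weight, leave_time) entries with a running load instead of A's zero-padded list that is popped, re-summed over its whole length and padded every tick, and B returns t + bridge_length directly instead of simulating the final drain phase.
-- outside the precondition, e.g. on solution(2, 0, [-5, 5]): A returns 4, B returns 4
import Mathlib
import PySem

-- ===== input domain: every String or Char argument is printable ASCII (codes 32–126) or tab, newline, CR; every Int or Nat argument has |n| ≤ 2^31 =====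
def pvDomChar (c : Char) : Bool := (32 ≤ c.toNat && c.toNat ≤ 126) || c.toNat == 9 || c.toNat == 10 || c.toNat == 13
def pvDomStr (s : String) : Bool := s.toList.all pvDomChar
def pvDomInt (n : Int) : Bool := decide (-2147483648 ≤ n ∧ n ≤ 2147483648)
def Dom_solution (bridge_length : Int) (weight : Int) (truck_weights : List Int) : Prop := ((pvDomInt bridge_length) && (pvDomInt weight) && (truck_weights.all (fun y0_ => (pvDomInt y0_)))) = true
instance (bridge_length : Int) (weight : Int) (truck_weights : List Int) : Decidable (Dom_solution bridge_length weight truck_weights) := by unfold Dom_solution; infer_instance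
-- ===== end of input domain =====

-- B replaces A's zero-padded bridge list (re-summed every tick) by a deque of
-- (weight, leave_time) entries with a running load, and returns t + bridge_length
-- instead of simulating the final drain phase; like A, the Python B empties
-- truck_weights in place (the equivalence proved here is about the return value).

-- ===== PORT A =====
-- The while loop is ported as fuel recursion; the fuel is a totality guard only:
-- on inputs satisfying Pre_solution it is never exhausted (shown by the proof below).
def solA_loop (weight : Int) : Nat → Int → List Int → List Int → Int
  | 0, ans, _, _ => ans
  | _ + 1, ans, [], _ => ans
  | fuel + 1, ans, _ :: rest, tw =>
    match tw with
    | [] => solA_loop weight fuel (ans + 1) rest []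
    | w :: tws =>
      if rest.sum + w ≤ weight then solA_loop weight fuel (ans + 1) (rest ++ [w]) tws
      else solA_loop weight fuel (ans + 1) (rest ++ [0]) (w :: tws)

def solution (bridge_length : Int) (weight : Int) (truck_weights : List Int) : Int :=
  solA_loop weight ((truck_weights.length + 1) * (bridge_length.toNat + 1)) 0
    (List.replicate bridge_length.toNat 0) truck_weights

-- ===== PORT B =====
-- Same fuel-as-totality-guard; never exhausted under Pre_solution.
def solB_loop (weight L : Int) : Nat → Int → List (Int × Int) → Int → List Int → Int
  | 0, t, _, _, _ => t + L
  | fuel + 1, t, on, load, tw =>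
    match tw with
    | [] => t + L
    | w :: tws =>
      let t1 := t + 1
      let p : List (Int × Int) × Int :=
        match on with
        | (w0, lv0) :: os => if lv0 ≤ t1 then (os, load - w0) else ((w0, lv0) :: os, load)
        | [] => ([], load)
      if p.2 + w ≤ weight then
        solB_loop weight L fuel t1 (p.1 ++ [(w, t1 + L)]) (p.2 + w) tws
      else solB_loop weight L fuel t1 p.1 p.2 (w :: tws)

def solution_alt (bridge_length : Int) (weight : Int) (truck_weights : List Int) : Int :=
  if bridge_length ≤ 0 then 0
  else solB_loop weight bridge_length ((truck_weights.length + 1) * (bridge_length.toNat + 1)) 0 [] 0 truck_weights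

-- ===== PRECONDITION & SPEC =====
-- Pre_ excludes positive-length bridges carrying a truck heavier than the weight
-- limit: there A loops forever once the bridge drains (only on a few such inputs do
-- negative weights let A return anyway, and B returns the same value there).
def Pre_solution (bridge_length : Int) (weight : Int) (truck_weights : List Int) : Prop :=
  bridge_length ≤ 0 ∨ (1 ≤ bridge_length ∧ ∀ x ∈ truck_weights, x ≤ weight)
instance (bridge_length : Int) (weight : Int) (truck_weights : List Int) : Decidable (Pre_solution bridge_length weight truck_weights) := by unfold Pre_solution; infer_instance

def pvWitness_solution : Int × Int × List Int := (2, 10, [7, 4, 5, 6])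

def Spec_solution (bridge_length : Int) (weight : Int) (truck_weights : List Int) (out : Int) : Prop := out = solution_alt bridge_length weight truck_weights
instance (bridge_length : Int) (weight : Int) (truck_weights : List Int) (out : Int) : Decidable (Spec_solution bridge_length weight truck_weights out) := by unfold Spec_solution; infer_instance

-- ===== CLAIM (what is proved, stated in full; the proofs are below) =====
def Claim_equal_solution : Prop := ∀ (bridge_length : Int) (weight : Int) (truck_weights : List Int), Dom_solution bridge_length weight truck_weights → Pre_solution bridge_length weight truck_weights → Spec_solution bridge_length weight truck_weights (solution bridge_length weight truck_weights)

-- ===== LEMMAS AND PROOFS =====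

-- the weight sitting at the bridge slot that will be vacated at time k (0 if none)
def bslot (on : List (Int × Int)) (k : Int) : Int :=
  ((on.find? (fun e => e.2 == k)).map Prod.fst).getD 0

-- the bridge list of A reconstructed from B's deque, at current time t
def render (t : Int) : Nat → List (Int × Int) → List Int
  | 0, _ => []
  | L + 1, on => bslot on (t + 1) :: render (t + 1) L on

-- position (1-based) of the last nonzero slot: the termination potential
def lastNZ (b : List Int) : Nat := (b.reverse.dropWhile (· == 0)).length

theorem render_length (t : Int) (L : Nat) (on : List (Int × Int)) :
    (render t L on).length = L := by
  induction L generalizing t with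
  | zero => rfl
  | succ L ih => simp [render, ih]

theorem bslot_nil (k : Int) : bslot [] k = 0 := rfl

theorem render_nil (t : Int) (L : Nat) : render t L [] = List.replicate L 0 := by
  induction L generalizing t with
  | zero => rfl
  | succ L ih => simp [render, bslot_nil, ih, List.replicate_succ]

theorem bslot_eq_zero (on : List (Int × Int)) (k : Int) (h : ∀ e ∈ on, e.2 ≠ k) :
    bslot on k = 0 := by
  have : on.find? (fun e => e.2 == k) = none := by
    rw [List.find?_eq_none]
    intro e he
    simpa using h e he
  simp [bslot, this]

theorem bslot_cons_ne (w0 lv0 k : Int) (os : List (Int × Int)) (h : lv0 ≠ k) :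
    bslot ((w0, lv0) :: os) k = bslot os k := by
  simp [bslot, List.find?_cons, h]

theorem bslot_cons_self (w0 k : Int) (os : List (Int × Int)) :
    bslot ((w0, k) :: os) k = w0 := by
  simp [bslot, List.find?_cons]

theorem bslot_append_ne (on : List (Int × Int)) (e : Int × Int) (k : Int) (h : e.2 ≠ k) :
    bslot (on ++ [e]) k = bslot on k := by
  induction on with
  | nil => simp [bslot, List.find?, h]
  | cons a os ih =>
    by_cases ha : a.2 = k
    · obtain ⟨aw, alv⟩ := a
      simp at ha; subst ha
      simp [bslot_cons_self]
    · obtain ⟨aw, alv⟩ := a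
      simp at ha
      rw [List.cons_append, bslot_cons_ne _ _ _ _ ha, bslot_cons_ne _ _ _ _ ha, ih]

theorem bslot_append_self (on : List (Int × Int)) (w k : Int) (h : ∀ e ∈ on, e.2 ≠ k) :
    bslot (on ++ [(w, k)]) k = w := by
  induction on with
  | nil => simp [bslot_cons_self]
  | cons a os ih =>
    obtain ⟨aw, alv⟩ := a
    have ha : alv ≠ k := by simpa using h (aw, alv) (by simp)
    rw [List.cons_append, bslot_cons_ne _ _ _ _ ha]
    exact ih (fun e he => h e (List.mem_cons_of_mem _ he))

theorem render_congr (L : Nat) : ∀ (t : Int) (on on' : List (Int × Int)),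
    (∀ k, t < k → k ≤ t + (L : Int) → bslot on k = bslot on' k) →
    render t L on = render t L on' := by
  induction L with
  | zero => intro t on on' _; rfl
  | succ L ih =>
    intro t on on' h
    have h1 : bslot on (t + 1) = bslot on' (t + 1) := by
      apply h <;> push_cast <;> omega
    rw [render, render, h1, ih (t + 1) on on']
    intro k hk1 hk2
    apply h <;> push_cast at hk2 ⊢ <;> omega

theorem render_snoc (L : Nat) : ∀ (t : Int) (on : List (Int × Int)),
    render t (L + 1) on = render t L on ++ [bslot on (t + 1 + (L : Int))] := by
  induction L with
  | zero => intro t on; simp [render]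
  | succ L ih =>
    intro t on
    rw [render, ih (t + 1) on, render, List.cons_append]
    congr 3
    push_cast
    ring

theorem lastNZ_le_length (b : List Int) : lastNZ b ≤ b.length := by
  calc (b.reverse.dropWhile (· == 0)).length ≤ b.reverse.length := List.length_dropWhile_le _ _
    _ = b.length := List.length_reverse

theorem lastNZ_snoc_zero (b : List Int) : lastNZ (b ++ [0]) = lastNZ b := by
  simp [lastNZ, List.reverse_append, List.dropWhile]

theorem lastNZ_cons_pos (h : Int) (rest : List Int) (hr : 1 ≤ lastNZ rest) :
    lastNZ (h :: rest) = lastNZ rest + 1 := by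
  unfold lastNZ at *
  rw [List.reverse_cons, List.dropWhile_append]
  have : ¬ (rest.reverse.dropWhile (· == 0)).isEmpty := by
    intro hc
    rw [List.isEmpty_iff] at hc
    rw [hc] at hr
    simp at hr
  simp only [this, if_false]
  simp

theorem lastNZ_eq_zero_sum (b : List Int) (h : lastNZ b = 0) : b.sum = 0 := by
  have hall : ∀ x ∈ b.reverse, x = 0 := by
    have := List.dropWhile_eq_nil_iff.mp (List.eq_nil_of_length_eq_zero h)
    intro x hx
    simpa using this x hx
  have : ∀ x ∈ b, x = 0 := fun x hx => hall x (by simpa using hx)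
  exact List.sum_eq_zero this

theorem lastNZ_replicate (L : Nat) : lastNZ (List.replicate L 0) = 0 := by
  induction L with
  | zero => rfl
  | succ L ih =>
    unfold lastNZ at *
    rw [List.replicate_succ, List.reverse_cons, List.dropWhile_append]
    simp only [List.reverse_replicate] at *
    simp [ih, List.dropWhile]

theorem solA_drain (weight : Int) : ∀ (b : List Int) (f : Nat) (ans : Int),
    b.length ≤ f → solA_loop weight f ans b [] = ans + b.length := by
  intro b
  induction b with
  | nil => intro f ans _; cases f <;> simp [solA_loop]
  | cons x rest ih =>
    intro f ans hf
    obtain ⟨f', rfl⟩ : ∃ f', f = f' + 1 := ⟨f - 1, by simp at hf; omega⟩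
    rw [solA_loop, ih f' (ans + 1) (by simp at hf ⊢; omega)]
    simp only [List.length_cons]
    push_cast
    ring


-- the common tail of one simulation step, after B's departure handling
theorem step_finish (weight : Int) (L' : Nat) (f : Nat) (t w : Int) (tws : List Int)
    (on₁ : List (Int × Int)) (h0 : Int)
    (ih : ∀ (tw : List Int) (t : Int) (on : List (Int × Int)),
      List.Pairwise (fun a b => a.2 < b.2) on →
      (∀ e ∈ on, t < e.2 ∧ e.2 ≤ t + ((L' + 1 : Nat) : Int)) →
      (∀ x ∈ tw, x ≤ weight) →
      tw.length * (L' + 1 + 1) + lastNZ (render t (L' + 1) on) + (L' + 1) + 1 ≤ f →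
      solA_loop weight f t (render t (L' + 1) on) tw
        = solB_loop weight ((L' + 1 : Nat) : Int) f t on (render t (L' + 1) on).sum tw)
    (hpw : List.Pairwise (fun a b => a.2 < b.2) on₁)
    (hbd : ∀ e ∈ on₁, t + 1 < e.2 ∧ e.2 ≤ t + ((L' + 1 : Nat) : Int))
    (htw : ∀ x ∈ w :: tws, x ≤ weight)
    (hf : (w :: tws).length * (L' + 1 + 1) + lastNZ (h0 :: render (t + 1) L' on₁) + (L' + 1) + 1 ≤ f + 1) :
    (if (render (t + 1) L' on₁).sum + w ≤ weight
      then solA_loop weight f (t + 1) (render (t + 1) L' on₁ ++ [w]) tws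
      else solA_loop weight f (t + 1) (render (t + 1) L' on₁ ++ [0]) (w :: tws))
    = (if (render (t + 1) L' on₁).sum + w ≤ weight
      then solB_loop weight ((L' + 1 : Nat) : Int) f (t + 1)
          (on₁ ++ [(w, t + 1 + ((L' + 1 : Nat) : Int))]) ((render (t + 1) L' on₁).sum + w) tws
      else solB_loop weight ((L' + 1 : Nat) : Int) f (t + 1) on₁ ((render (t + 1) L' on₁).sum) (w :: tws)) := by
  have hkey : t + 1 + 1 + (L' : Int) = t + 1 + ((L' + 1 : Nat) : Int) := by push_cast; ring
  have hne : ∀ e ∈ on₁, e.2 ≠ t + 1 + 1 + (L' : Int) := by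
    intro e he
    have := (hbd e he).2
    push_cast at this ⊢
    omega
  simp only [List.length_cons] at hf
  have hexp : (tws.length + 1) * (L' + 1 + 1) = tws.length * (L' + 1 + 1) + (L' + 1 + 1) := by ring
  rw [hexp] at hf
  rw [← hkey]
  split_ifs with hc
  · -- the waiting truck enters the bridge
    have h1 : render (t + 1) L' (on₁ ++ [(w, t + 1 + 1 + (L' : Int))]) = render (t + 1) L' on₁ := by
      apply render_congr
      intro k hk1 hk2
      apply bslot_append_ne
      push_cast at hk2 ⊢
      omega
    have h2 : render (t + 1) (L' + 1) (on₁ ++ [(w, t + 1 + 1 + (L' : Int))])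
        = render (t + 1) L' on₁ ++ [w] := by
      rw [render_snoc, h1, bslot_append_self _ _ _ hne]
    have hpw2 : List.Pairwise (fun a b => a.2 < b.2) (on₁ ++ [(w, t + 1 + 1 + (L' : Int))]) := by
      rw [List.pairwise_append]
      refine ⟨hpw, List.pairwise_singleton _ _, ?_⟩
      intro a ha b hb
      simp at hb
      rw [hb]
      have := (hbd a ha).2
      push_cast at this ⊢
      omega
    have hbd2 : ∀ e ∈ on₁ ++ [(w, t + 1 + 1 + (L' : Int))],
        t + 1 < e.2 ∧ e.2 ≤ t + 1 + ((L' + 1 : Nat) : Int) := by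
      intro e he
      rcases List.mem_append.mp he with he | he
      · have h1 := (hbd e he).1
        have h2 := (hbd e he).2
        push_cast at h2 ⊢
        omega
      · simp at he
        subst he
        constructor
        · simp
          omega
        · simp
          push_cast
          omega
    have hlen : lastNZ (render (t + 1) L' on₁ ++ [w]) ≤ L' + 1 := by
      have := lastNZ_le_length (render (t + 1) L' on₁ ++ [w])
      simpa [render_length] using this
    have hfuel : tws.length * (L' + 1 + 1) + lastNZ (render (t + 1) (L' + 1) (on₁ ++ [(w, t + 1 + 1 + (L' : Int))])) + (L' + 1) + 1 ≤ f := by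
      rw [h2]
      set M := tws.length * (L' + 1 + 1) with hM
      omega
    have := ih tws (t + 1) (on₁ ++ [(w, t + 1 + 1 + (L' : Int))]) hpw2 hbd2
      (fun x hx => htw x (List.mem_cons_of_mem _ hx)) hfuel
    rw [h2] at this
    rw [this]
    congr 1
    simp [List.sum_append]
  · -- blocked tick: nothing enters
    have h1 : render (t + 1) (L' + 1) on₁ = render (t + 1) L' on₁ ++ [0] := by
      rw [render_snoc, bslot_eq_zero _ _ hne]
    have hbd1 : ∀ e ∈ on₁, t + 1 < e.2 ∧ e.2 ≤ t + 1 + ((L' + 1 : Nat) : Int) := by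
      intro e he
      have h1 := (hbd e he).1
      have h2 := (hbd e he).2
      push_cast at h2 ⊢
      omega
    have hpos : 1 ≤ lastNZ (render (t + 1) L' on₁) := by
      by_contra hz
      have hz0 : lastNZ (render (t + 1) L' on₁) = 0 := by omega
      have := lastNZ_eq_zero_sum _ hz0
      have hw : w ≤ weight := htw w (List.mem_cons_self)
      omega
    have hfuel : (w :: tws).length * (L' + 1 + 1) + lastNZ (render (t + 1) (L' + 1) on₁) + (L' + 1) + 1 ≤ f := by
      rw [h1, lastNZ_snoc_zero]
      rw [lastNZ_cons_pos _ _ hpos] at hf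
      simp only [List.length_cons]
      rw [hexp]
      set M := tws.length * (L' + 1 + 1) with hM
      omega
    have := ih (w :: tws) (t + 1) on₁ hpw hbd1 htw hfuel
    rw [h1] at this
    rw [this]
    congr 1
    simp

-- the lockstep simulation: A on the rendered bridge equals B on the deque
theorem solAB_main (weight : Int) (L : Nat) (hL : 1 ≤ L) :
    ∀ (f : Nat) (tw : List Int) (t : Int) (on : List (Int × Int)),
    List.Pairwise (fun a b => a.2 < b.2) on →
    (∀ e ∈ on, t < e.2 ∧ e.2 ≤ t + (L : Int)) →
    (∀ x ∈ tw, x ≤ weight) →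
    tw.length * (L + 1) + lastNZ (render t L on) + L + 1 ≤ f →
    solA_loop weight f t (render t L on) tw
      = solB_loop weight (L : Int) f t on (render t L on).sum tw := by
  intro f
  induction f with
  | zero => intro tw t on _ _ _ hf; omega
  | succ f ih =>
    intro tw t on hpw hbd htw hf
    cases tw with
    | nil =>
      rw [solA_drain weight _ _ _ (by rw [render_length]; omega), render_length]
      rfl
    | cons w tws =>
      obtain ⟨L', rfl⟩ : ∃ L', L = L' + 1 := ⟨L - 1, by omega⟩
      have hbr : render t (L' + 1) on = bslot on (t + 1) :: render (t + 1) L' on := rfl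
      rcases on with _ | ⟨⟨w0, lv0⟩, os⟩
      · -- empty bridge: no departure
        have hf' : (w :: tws).length * (L' + 1 + 1) + lastNZ ((0 : Int) :: render (t + 1) L' ([] : List (Int × Int))) + (L' + 1) + 1 ≤ f + 1 := by
          have : render t (L' + 1) ([] : List (Int × Int)) = (0 : Int) :: render (t + 1) L' ([] : List (Int × Int)) := hbr
          rw [this] at hf
          exact hf
        have hstep := step_finish weight L' f t w tws [] 0 ih (List.Pairwise.nil)
          (by intro e he; simp at he) htw hf'
        rw [hbr]
        simp only [bslot_nil]
        simp only [solA_loop, solB_loop]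
        simpa using hstep
      · by_cases hlv : lv0 ≤ t + 1
        · -- the front truck leaves this tick
          have heq : lv0 = t + 1 := by
            have := (hbd (w0, lv0) (List.mem_cons_self)).1
            simp at this
            omega
          subst heq
          have hrest : render (t + 1) L' ((w0, t + 1) :: os) = render (t + 1) L' os := by
            apply render_congr
            intro k hk1 hk2
            apply bslot_cons_ne
            omega
          have hpw1 : List.Pairwise (fun a b => a.2 < b.2) os := hpw.of_cons
          have hbd1 : ∀ e ∈ os, t + 1 < e.2 ∧ e.2 ≤ t + ((L' + 1 : Nat) : Int) := by
            intro e he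
            have h1 := (List.pairwise_cons.mp hpw).1 e he
            have h2 := (hbd e (List.mem_cons_of_mem _ he)).2
            simp at h1
            exact ⟨by omega, h2⟩
          have hf' : (w :: tws).length * (L' + 1 + 1) + lastNZ (w0 :: render (t + 1) L' os) + (L' + 1) + 1 ≤ f + 1 := by
            have : render t (L' + 1) ((w0, t + 1) :: os) = w0 :: render (t + 1) L' os := by
              rw [hbr, bslot_cons_self, hrest]
            rw [this] at hf
            exact hf
          have hstep := step_finish weight L' f t w tws os w0 ih hpw1 hbd1 htw hf'
          have hsum : (render t (L' + 1) ((w0, t + 1) :: os)).sum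
              = w0 + (render (t + 1) L' os).sum := by
            rw [hbr, bslot_cons_self, hrest, List.sum_cons]
          rw [hbr, bslot_cons_self, hrest]
          simp only [solA_loop, solB_loop]
          simp only [List.sum_cons]
          have hred : w0 + (render (t + 1) L' os).sum - w0 = (render (t + 1) L' os).sum := by ring
          simpa [hlv, hred] using hstep
        · -- the front truck stays
          have hgt : t + 1 < lv0 := by omega
          have hz : bslot ((w0, lv0) :: os) (t + 1) = 0 := by
            apply bslot_eq_zero
            intro e he
            rcases List.mem_cons.mp he with he | he
            · rw [he]; simp; omega
            · have := (List.pairwise_cons.mp hpw).1 e he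
              simp at this
              omega
          have hrest : render (t + 1) L' ((w0, lv0) :: os) = render (t + 1) L' ((w0, lv0) :: os) := rfl
          have hbd1 : ∀ e ∈ (w0, lv0) :: os, t + 1 < e.2 ∧ e.2 ≤ t + ((L' + 1 : Nat) : Int) := by
            intro e he
            rcases List.mem_cons.mp he with he | he
            · rw [he]
              exact ⟨by simp; omega, (hbd _ (by rw [← he]; exact List.mem_cons_self)).2⟩
            · have h1 := (List.pairwise_cons.mp hpw).1 e he
              have h2 := (hbd e (List.mem_cons_of_mem _ he)).2
              simp at h1
              exact ⟨by omega, h2⟩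
          have hf' : (w :: tws).length * (L' + 1 + 1) + lastNZ ((0 : Int) :: render (t + 1) L' ((w0, lv0) :: os)) + (L' + 1) + 1 ≤ f + 1 := by
            have : render t (L' + 1) ((w0, lv0) :: os) = (0 : Int) :: render (t + 1) L' ((w0, lv0) :: os) := by
              rw [hbr, hz]
            rw [this] at hf
            exact hf
          have hstep := step_finish weight L' f t w tws ((w0, lv0) :: os) 0 ih hpw hbd1 htw hf'
          have hsum : (render t (L' + 1) ((w0, lv0) :: os)).sum
              = (render (t + 1) L' ((w0, lv0) :: os)).sum := by
            rw [hbr, hz, List.sum_cons]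
            ring
          rw [hbr, hz]
          simp only [solA_loop, solB_loop]
          simp only [List.sum_cons]
          have hnlv : ¬ (lv0 ≤ t + 1) := by omega
          simpa [hnlv] using hstep

theorem solution_spec : Claim_equal_solution := by
  intro bl w tw _ hPre
  unfold Spec_solution solution solution_alt
  rcases hPre with hble | ⟨hbl, htw⟩
  · rw [if_pos hble]
    have hz : bl.toNat = 0 := by omega
    rw [hz]
    have hm : (tw.length + 1) * (0 + 1) = tw.length + 1 := by ring
    rw [hm]
    simp [solA_loop]
  rw [if_neg (by omega)]
  have hL : 1 ≤ bl.toNat := by omega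
  have hcast : ((bl.toNat : Nat) : Int) = bl := Int.toNat_of_nonneg (by omega)
  have hfuel : tw.length * (bl.toNat + 1) + lastNZ (render 0 bl.toNat []) + bl.toNat + 1
      ≤ (tw.length + 1) * (bl.toNat + 1) := by
    rw [render_nil, lastNZ_replicate]
    have hexp : (tw.length + 1) * (bl.toNat + 1) = tw.length * (bl.toNat + 1) + (bl.toNat + 1) := by
      ring
    set M := tw.length * (bl.toNat + 1) with hM
    omega
  have hmain := solAB_main w bl.toNat hL ((tw.length + 1) * (bl.toNat + 1)) tw 0 []
    List.Pairwise.nil (by intro e he; simp at he) htw hfuel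
  rw [render_nil] at hmain
  simp only [List.sum_replicate, smul_zero] at hmain
  rw [hcast] at hmain
  exact hmain
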